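-- pv_equiv track=rewrite | github.com/Bwc9876/BCTC-Projects | Python/CoolEncrypt/ciphers.py | construct_table_encryption
-- ===== SOURCE A (Python) =====
-- def construct_table_encryption(content: str, base_table: list[list[str]]) -> list[list[str]]:
--     current_col = 0
--     table = [r.copy() for r in base_table]
--     max_col = len(table) - 1
--     for character in content:
--         if current_col > max_col:
--             current_col = 0
--         table[current_col].append(character)
--         current_col += 1
--     if current_col < max_col + 1:
--         for col in table[current_col:max_col + 1]:
--             col.append('-')
--     return table
-- ===== SOURCE B (Python) =====
-- def construct_table_encryption(content: str, base_table: list[list[str]]) -> list[list[str]]: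
--     c = len(base_table)
--     n = len(content)
--     cols = [base_table[j].copy() + list(content[j::c]) for j in range(c)]
--     start = n % c if c else 0
--     if n == 0 or start != 0:
--         for col in cols[start:]:
--             col.append('-')
--     return cols
-- ===== Notes on version B (the rewrite author's own statement) =====
-- stated objective: idiomatic
-- what changed: Replaces the stateful reset-counter loop that mutates one column per character with a declarative build: column j is base_table[j] plus the strided slice content[j::c], and the padding start is computed in closed form as len(content) % c instead of being read off leftover loop state.
import Mathlib
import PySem

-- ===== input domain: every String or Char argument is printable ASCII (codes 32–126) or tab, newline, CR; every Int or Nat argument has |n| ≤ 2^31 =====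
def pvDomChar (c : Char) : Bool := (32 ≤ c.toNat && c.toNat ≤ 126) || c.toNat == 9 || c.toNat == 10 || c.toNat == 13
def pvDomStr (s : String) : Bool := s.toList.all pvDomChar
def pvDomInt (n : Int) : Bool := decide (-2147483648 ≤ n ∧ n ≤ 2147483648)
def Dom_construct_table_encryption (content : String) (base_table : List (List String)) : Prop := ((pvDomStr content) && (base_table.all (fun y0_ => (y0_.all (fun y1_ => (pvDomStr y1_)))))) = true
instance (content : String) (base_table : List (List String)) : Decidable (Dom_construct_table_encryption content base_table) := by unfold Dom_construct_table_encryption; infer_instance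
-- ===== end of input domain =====

-- B distributes characters into columns by strided slicing (column j gets content[j::c]) and computes the
-- padding start in closed form as len(content) % c, instead of A's stateful reset-counter loop.
-- Equality of the RETURN value only (neither implementation mutates its arguments).

-- ===== PORT A =====
def construct_table_encryption (content : String) (base_table : List (List String)) : List (List String) :=
  let table := base_table.map (fun r => r)
  let max_col : Int := (table.length : Int) - 1
  let res := content.toList.foldl
    (fun (st : Int × List (List String)) character =>
      let current_col := if st.1 > max_col then 0 else st.1
      (current_col + 1, st.2.modify current_col.toNat (fun col => col ++ [character.toString])))
    ((0 : Int), table)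
  if res.1 < max_col + 1 then
    res.2.mapIdx (fun i col => if res.1 ≤ (i : Int) then col ++ ["-"] else col)
  else res.2

-- ===== PORT B =====
def construct_table_encryption_alt (content : String) (base_table : List (List String)) : List (List String) :=
  let c : Int := (base_table.length : Int)
  let n : Int := PySem.Str.len content
  let cols := (PySem.List.pyRange 0 c).map (fun j =>
    PySem.List.pyGetD base_table j [] ++
      ((PySem.List.slice? content.toList (some j) none c).getD []).map (fun ch => ch.toString))
  let start : Int := if c ≠ 0 then PySem.Int.mod n c else 0
  if n = 0 ∨ start ≠ 0 then
    PySem.List.slice cols none (some start) ++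
      (PySem.List.slice cols (some start) none).map (fun col => col ++ ["-"])
  else cols

-- ===== PRECONDITION & SPEC =====
-- Pre_ excludes exactly the inputs where A raises: base_table = [] together with non-empty content
-- (A then evaluates table[0] on an empty table, IndexError).
def Pre_construct_table_encryption (content : String) (base_table : List (List String)) : Prop :=
  base_table ≠ [] ∨ content = ""
instance (content : String) (base_table : List (List String)) : Decidable (Pre_construct_table_encryption content base_table) := by unfold Pre_construct_table_encryption; infer_instance

def pvWitness_construct_table_encryption : String × List (List String) := ("ab", [["x"], []])

def Spec_construct_table_encryption (content : String) (base_table : List (List String)) (out : List (List String)) : Prop := out = construct_table_encryption_alt content base_table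
instance (content : String) (base_table : List (List String)) (out : List (List String)) : Decidable (Spec_construct_table_encryption content base_table out) := by unfold Spec_construct_table_encryption; infer_instance

-- ===== CLAIM (what is proved, stated in full; the proofs are below) =====
def Claim_equal_construct_table_encryption : Prop := ∀ (content : String) (base_table : List (List String)), Dom_construct_table_encryption content base_table → Pre_construct_table_encryption content base_table → Spec_construct_table_encryption content base_table (construct_table_encryption content base_table)

-- ===== LEMMAS AND PROOFS =====

-- number of characters landing in column j (indices i < n with i % c = j)
def pvCnt (c j n : Nat) : Nat := if j < n then (n - j + c - 1) / c else 0

-- the characters of column j, read off at indices j, j+c, j+2c, …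
def pvCol (c j : Nat) (cs : List Char) : List Char :=
  (List.range (pvCnt c j cs.length)).filterMap (fun k => cs[j + c * k]?)

-- A's current_col after k characters
def pvCur (c : Nat) : Nat → Int
  | 0 => 0
  | k + 1 => ((k % c : Nat) : Int) + 1

lemma pvSuccMod (c m : Nat) (hc : 0 < c) :
    (m + 1) % c = if m % c + 1 = c then 0 else m % c + 1 := by
  have key : m + 1 = c * (m / c) + (m % c + 1) := by
    have := Nat.div_add_mod m c; omega
  have hlt : m % c < c := Nat.mod_lt _ hc
  by_cases h : m % c + 1 = c
  · have : m + 1 = c * (m / c + 1) := by rw [key]; ring_nf; omega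
    simp [h, this, Nat.mul_mod_right]
  · rw [key, Nat.mul_add_mod, Nat.mod_eq_of_lt (by omega)]
    simp [h]

lemma pvModSub (c j n : Nat) (hj : j < c) (hjn : j ≤ n) :
    (n % c = j ↔ (n - j) % c = 0) := by
  have hc : 0 < c := by omega
  set d := n - j with hd
  have hn : n = j + d := by omega
  have he : d % c < c := Nat.mod_lt _ hc
  have h1 : n % c = (j + d % c) % c := by
    rw [hn, Nat.add_mod, Nat.mod_eq_of_lt hj]
  have h2 : (j + d % c) % c = if j + d % c < c then j + d % c else j + d % c - c := by
    by_cases hlt : j + d % c < c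
    · simp [hlt, Nat.mod_eq_of_lt hlt]
    · rw [Nat.mod_eq_sub_mod (by omega), Nat.mod_eq_of_lt (by omega)]
      simp [hlt]
  rw [h1, h2]
  split_ifs with h <;> omega

lemma pvCnt_succ (c j n : Nat) (hc : 0 < c) (hj : j < c) :
    pvCnt c j (n + 1) = pvCnt c j n + (if n % c = j then 1 else 0) := by
  unfold pvCnt
  rcases lt_trichotomy j n with hjn | hjn | hjn
  · have hd : 1 ≤ n - j := by omega
    have e1 : n + 1 - j + c - 1 = (n - j) + c := by omega
    have e2 : n - j + c - 1 = (n - j - 1) + c := by omega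
    have e3 : n - j = (n - j - 1) + 1 := by omega
    have hmod : n % c = j ↔ c ∣ (n - j) := by
      rw [pvModSub c j n hj (by omega), Nat.dvd_iff_mod_eq_zero]
    rw [if_pos (by omega), if_pos hjn, e1, e2, Nat.add_div_right _ hc, Nat.add_div_right _ hc,
      e3, Nat.succ_div]
    have hdd : (c ∣ n - j - 1 + 1) ↔ (n % c = j) := by rw [← e3]; exact hmod.symm
    have e4 : n - j - 1 + 1 - 1 = n - j - 1 := by omega
    by_cases hdv : n % c = j
    · rw [if_pos (hdd.mpr hdv), if_pos hdv]
      simp only [e4]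
    · rw [if_neg (fun h => hdv (hdd.mp h)), if_neg hdv]
      simp only [e4, Nat.add_zero]
  · subst hjn
    rw [if_pos (by omega), if_neg (by omega)]
    have : j + 1 - j + c - 1 = c := by omega
    rw [this, Nat.div_self hc, if_pos (by rw [Nat.mod_eq_of_lt hj])]
  · rw [if_neg (by omega), if_neg (by omega)]
    have : n % c ≤ n := Nat.mod_le _ _
    rw [if_neg (by omega)]

lemma pvIdx_lt (c j n k : Nat) (hc : 0 < c) (hk : k < pvCnt c j n) : j + c * k < n := by
  unfold pvCnt at hk
  by_cases hjn : j < n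
  · rw [if_pos hjn] at hk
    set d := n - j with hd
    have hd1 : 1 ≤ d := by omega
    have e2 : d + c - 1 = (d - 1) + c := by omega
    have hcnt : (d + c - 1) / c = (d - 1) / c + 1 := by rw [e2, Nat.add_div_right _ hc]
    have hk' : k ≤ (d - 1) / c := by omega
    have h1 : c * k ≤ c * ((d - 1) / c) := Nat.mul_le_mul_left _ hk'
    have h2 : c * ((d - 1) / c) ≤ d - 1 := Nat.mul_div_le _ _
    omega
  · rw [if_neg hjn] at hk; omega

lemma pvIdx_new (c j n : Nat) (hc : 0 < c) (hj : j < c) (h : n % c = j) :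
    j + c * pvCnt c j n = n := by
  have hjn : j ≤ n := h ▸ Nat.mod_le _ _
  unfold pvCnt
  rcases eq_or_lt_of_le hjn with heq | hlt
  · rw [if_neg (by omega)]; omega
  · rw [if_pos hlt]
    have hdvd : c ∣ (n - j) := Nat.dvd_of_mod_eq_zero ((pvModSub c j n hj hjn).mp h)
    obtain ⟨q, hq⟩ := hdvd
    have hq1 : 1 ≤ q := by
      rcases Nat.eq_zero_or_pos q with h0 | h1
      · subst h0; simp at hq; omega
      · exact h1
    have e : n - j + c - 1 = c * q + (c - 1) := by omega
    rw [e, Nat.mul_add_div hc, Nat.div_eq_of_lt (by omega), Nat.add_zero]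
    omega

lemma pvCol_append (c j : Nat) (cs : List Char) (a : Char) (hc : 0 < c) (hj : j < c) :
    pvCol c j (cs ++ [a]) = pvCol c j cs ++ (if cs.length % c = j then [a] else []) := by
  unfold pvCol
  rw [List.length_append, List.length_singleton, pvCnt_succ _ _ _ hc hj]
  by_cases h : cs.length % c = j
  · rw [if_pos h, if_pos h, List.range_succ, List.filterMap_append]
    congr 1
    · apply List.filterMap_congr
      intro k hk
      have : j + c * k < cs.length := pvIdx_lt c j cs.length k hc (List.mem_range.mp hk)
      rw [List.getElem?_append_left this]
    · have : j + c * pvCnt c j cs.length = cs.length := pvIdx_new c j cs.length hc hj h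
      simp [this]
  · rw [if_neg h, if_neg h, Nat.add_zero, List.append_nil]
    apply List.filterMap_congr
    intro k hk
    have : j + c * k < cs.length := pvIdx_lt c j cs.length k hc (List.mem_range.mp hk)
    rw [List.getElem?_append_left this]

lemma pvSlice_eq (c j : Nat) (cs : List Char) (hc : 0 < c) (hj : j < c) :
    (PySem.List.slice? cs (some (j : Int)) none (c : Int)).getD [] = pvCol c j cs := by
  unfold pvCol pvCnt
  have hc0 : ((c : Int) ≠ 0) := by positivity
  have hcpos : (0 : Int) < (c : Int) := by positivity
  simp only [PySem.List.slice?, PySem.List.sliceIndices, if_neg hc0,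
    if_neg (by omega : ¬ ((c : Int) < 0)), if_pos hcpos,
    if_neg (by omega : ¬ ((j : Int) < 0))]
  by_cases hjn : j < cs.length
  · have hmin : min (j : Int) (cs.length : Int) = (j : Int) := by omega
    rw [hmin, if_pos (by omega : (j : Int) < (cs.length : Int)), if_pos hjn]
    have h1 : ((cs.length : Int) - ↑j + ↑c - 1) = ((cs.length - j + c - 1 : Nat) : Int) := by omega
    have hcount : (((cs.length : Int) - ↑j + ↑c - 1) / (c : Int)).toNat = (cs.length - j + c - 1) / c := by
      rw [h1, show ((cs.length - j + c - 1 : Nat) : Int) / (c : Int)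
          = (((cs.length - j + c - 1) / c : Nat) : Int) from by exact_mod_cast rfl]
      exact Int.toNat_natCast _
    rw [hcount]
    simp only [Option.getD_some]
    apply List.filterMap_congr
    intro k _
    rw [show ((j : Int) + ↑c * ↑k).toNat = j + c * k from by
      rw [show ((j : Int) + ↑c * ↑k) = ((j + c * k : Nat) : Int) from by push_cast; ring,
        Int.toNat_natCast]]
  · have hmin : min (j : Int) (cs.length : Int) = (cs.length : Int) := by omega
    rw [hmin, if_neg (by omega : ¬ ((cs.length : Int) < (cs.length : Int))), if_neg hjn]
    simp

lemma pvSelfMap {α : Type} (l : List α) (d : α) :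
    (List.range l.length).map (fun j => l.getD j d) = l := by
  apply List.ext_getElem
  · simp
  · intro i h1 h2
    simp [List.getD_eq_getElem?_getD, List.getElem?_eq_getElem h2]

lemma pvModifyMapRange {α : Type} (f : Nat → α) (g : α → α) (c m : Nat) :
    ((List.range c).map f).modify m g = (List.range c).map (fun j => if j = m then g (f j) else f j) := by
  apply List.ext_getElem
  · simp
  · intro i h1 h2
    simp only [List.getElem_modify, List.getElem_map, List.getElem_range]
    by_cases h : m = i <;> simp [h, eq_comm]

lemma pvMapIdxPad (l : List (List String)) (s : Nat) :
    l.mapIdx (fun i col => if (s : Int) ≤ (i : Int) then col ++ ["-"] else col) =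
      l.take s ++ (l.drop s).map (fun col => col ++ ["-"]) := by
  induction l generalizing s with
  | nil => simp
  | cons x xs ih =>
      rw [List.mapIdx_cons]
      cases s with
      | zero =>
          have hfun : (fun i col => if ((0 : Nat) : Int) ≤ ((i + 1 : Nat) : Int) then col ++ ["-"] else col)
              = (fun (i : Nat) col => if ((0 : Nat) : Int) ≤ (i : Int) then col ++ ["-"] else col) := by
            funext i col
            rw [if_pos (by positivity), if_pos (by positivity)]
          rw [if_pos (by positivity), hfun, ih 0]
          simp
      | succ t =>
          have hfun : (fun i col => if ((t + 1 : Nat) : Int) ≤ ((i + 1 : Nat) : Int) then col ++ ["-"] else col)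
              = (fun (i : Nat) col => if ((t : Nat) : Int) ≤ (i : Int) then col ++ ["-"] else col) := by
            funext i col
            by_cases h : (t : Int) ≤ (i : Int)
            · rw [if_pos (by omega), if_pos h]
            · rw [if_neg (by omega), if_neg h]
          rw [if_neg (by omega), hfun, ih t]
          simp

lemma pvCur_cc (c k : Nat) (hc : 0 < c) :
    (if pvCur c k > (c : Int) - 1 then (0 : Int) else pvCur c k) = ((k % c : Nat) : Int) := by
  cases k with
  | zero =>
      rw [if_neg (by simp [pvCur]; omega)]
      simp [pvCur]
  | succ m =>
      have hlt : m % c < c := Nat.mod_lt _ hc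
      have hsm := pvSuccMod c m hc
      by_cases h : m % c + 1 = c
      · rw [if_pos (by simp [pvCur]; omega)]
        rw [hsm, if_pos h]; simp
      · rw [if_neg (by simp [pvCur]; omega)]
        rw [hsm, if_neg h]; simp [pvCur]

lemma pvFoldA (base : List (List String)) (cs : List Char) (hc : 0 < base.length) :
    cs.foldl
      (fun (st : Int × List (List String)) character =>
        ((if st.1 > (base.length : Int) - 1 then 0 else st.1) + 1,
         st.2.modify (if st.1 > (base.length : Int) - 1 then 0 else st.1).toNat
           (fun col => col ++ [character.toString])))
      ((0 : Int), base)
    = (pvCur base.length cs.length,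
       (List.range base.length).map
         (fun j => base.getD j [] ++ (pvCol base.length j cs).map (fun ch => ch.toString))) := by
  induction cs using List.reverseRecOn with
  | nil =>
      have : ∀ j, pvCol base.length j ([] : List Char) = [] := by
        intro j; unfold pvCol pvCnt; simp
      simp only [List.foldl_nil, List.length_nil]
      rw [show pvCur base.length 0 = 0 from rfl]
      congr 1
      conv_lhs => rw [← pvSelfMap base []]
      apply List.map_congr_left
      intro j hj
      rw [this j]; simp
  | append_singleton cs a ih =>
      rw [List.foldl_append, ih, List.foldl_cons, List.foldl_nil]
      set c := base.length with hcdef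
      have hcc := pvCur_cc c cs.length hc
      have hmlt : cs.length % c < c := Nat.mod_lt _ hc
      simp only [hcc]
      rw [Prod.mk.injEq]
      refine ⟨by simp [pvCur], ?_⟩
      rw [Int.toNat_natCast, pvModifyMapRange _ _ c (cs.length % c)]
      apply List.map_congr_left
      intro j hj
      have hjc : j < c := List.mem_range.mp hj
      rw [pvCol_append c j cs a hc hjc]
      by_cases h : cs.length % c = j
      · rw [if_pos h.symm, if_pos h]
        simp [List.map_append]
      · rw [if_neg (fun hh => h hh.symm), if_neg h]
        simp

lemma pvCurPad (c n : Nat) (hc : 0 < c) (h : n = 0 ∨ n % c ≠ 0) :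
    pvCur c n = ((n % c : Nat) : Int) := by
  cases n with
  | zero => simp [pvCur]
  | succ m =>
      have hr := pvSuccMod c m hc
      have hlt : m % c < c := Nat.mod_lt _ hc
      rcases h with h | h
      · omega
      · rw [hr] at h ⊢
        rw [if_neg (fun hh => h (by rw [if_pos hh]))]
        simp [pvCur]

lemma pvCurFull (c n : Nat) (hc : 0 < c) (hn : n ≠ 0) (h : n % c = 0) :
    pvCur c n = (c : Int) := by
  cases n with
  | zero => omega
  | succ m =>
      have hr := pvSuccMod c m hc
      have hlt : m % c < c := Nat.mod_lt _ hc
      have : m % c + 1 = c := by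
        by_cases hh : m % c + 1 = c
        · exact hh
        · rw [hr, if_neg hh] at h; omega
      simp [pvCur]; omega

theorem construct_table_encryption_spec : Claim_equal_construct_table_encryption := by
  unfold Claim_equal_construct_table_encryption Spec_construct_table_encryption
  intro content base_table _ hpre
  by_cases hb : base_table = []
  · have hcontent : content = "" := by
      rcases hpre with h | h
      · exact absurd hb h
      · exact h
    subst hb; subst hcontent; decide
  · have hc : 0 < base_table.length := List.length_pos_iff.mpr hb
    have hcint : ((base_table.length : Int) ≠ 0) := by positivity
    unfold construct_table_encryption construct_table_encryption_alt
    simp only [List.map_id', PySem.Str.len_eq, PySem.List.pyRange_zero_natCast, List.map_map,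
      Function.comp_def]
    rw [pvFoldA base_table content.toList hc]
    dsimp only
    rw [List.map_congr_left (fun jj hjj => by
      rw [PySem.List.pyGetD_natCast,
        pvSlice_eq base_table.length jj content.toList hc (List.mem_range.mp hjj)] :
      ∀ jj ∈ List.range base_table.length,
        PySem.List.pyGetD base_table (jj : Int) [] ++
            ((PySem.List.slice? content.toList (some (jj : Int)) none (base_table.length : Int)).getD []).map
              (fun ch => ch.toString)
          = base_table.getD jj [] ++ (pvCol base_table.length jj content.toList).map (fun ch => ch.toString))]
    rw [if_pos hcint, PySem.Int.mod_natCast]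
    by_cases hpad : content.toList.length = 0 ∨ content.toList.length % base_table.length ≠ 0
    · have hmlt : content.toList.length % base_table.length < base_table.length := Nat.mod_lt _ hc
      rw [pvCurPad _ _ hc hpad]
      rw [if_pos (by omega : ((content.toList.length % base_table.length : Nat) : Int)
            < (base_table.length : Int) - 1 + 1)]
      rw [if_pos (by rcases hpad with h | h
                     · exact Or.inl (by exact_mod_cast congrArg (Nat.cast : Nat → Int) h)
                     · exact Or.inr (by omega))]
      rw [pvMapIdxPad, PySem.List.slice_to_natCast, PySem.List.slice_from_natCast]
    · push Not at hpad
      obtain ⟨hn0, hr0⟩ := hpad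
      rw [pvCurFull _ _ hc hn0 hr0]
      rw [if_neg (by omega : ¬ ((base_table.length : Int) < (base_table.length : Int) - 1 + 1))]
      rw [if_neg (by push Not
                     refine ⟨by exact_mod_cast hn0, ?_⟩
                     rw [hr0]; simp)]
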